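-- pv_equiv track=rewrite | github.com/Pjoterro/adventofocde | 2015/day08.py | count_new_len
-- ===== SOURCE A (Python) =====
-- def escape_and_count(line):
--     old_len = len(line)
--     new_line = '\"'
--     i = 0
--     while i < len(line):
--         if line[i] == '"':
--             new_line += '\\\"'
--         elif line[i] == '\\':
--             new_line += '\\\\'
--         else:
--             new_line += line[i]
--         i += 1
--     new_line += '\"'
--     new_len = len(new_line)
--     return old_len, new_len
--
-- def count_new_len(input):
--     old_lens = 0
--     new_lens = 0
--     for line in input.splitlines():
--         buffor = escape_and_count(line)
--         old_lens += buffor[0]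
--         new_lens += buffor[1]
--     return new_lens - old_lens
-- ===== SOURCE B (Python) =====
-- def count_new_len(input):
--     return input.count('"') + input.count('\\') + 2 * len(input.splitlines())
-- ===== Notes on version B (the rewrite author's own statement) =====
-- stated objective: faster
-- what changed: Replaces the per-line index loop that builds each escaped string character by character with a whole-input closed form: count the double quotes and backslashes over the entire input with two library scans and add 2 per line for the wrapping quotes.
import Mathlib
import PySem

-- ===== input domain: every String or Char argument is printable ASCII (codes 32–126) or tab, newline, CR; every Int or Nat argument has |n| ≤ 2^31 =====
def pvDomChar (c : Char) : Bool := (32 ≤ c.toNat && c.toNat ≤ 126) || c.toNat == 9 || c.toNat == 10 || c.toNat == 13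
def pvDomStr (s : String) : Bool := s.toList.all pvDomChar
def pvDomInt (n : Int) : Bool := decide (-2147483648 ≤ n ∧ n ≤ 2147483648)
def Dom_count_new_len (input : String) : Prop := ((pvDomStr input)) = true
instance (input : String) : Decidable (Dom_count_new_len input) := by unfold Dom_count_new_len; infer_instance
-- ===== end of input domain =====

-- ===== PORT A =====
-- Header: B replaces A's per-line index loop and string building with two whole-input
-- character counts plus 2 per line (objective: faster, measured).

-- while-loop of escape_and_count: left-to-right scan of the line, building new_line
def escapeLoop (line : List Char) (newLine : List Char) : List Char :=
  match line with
  | [] => newLine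
  | c :: rest =>
    if c = '"' then escapeLoop rest (newLine ++ ['\\', '"'])
    else if c = '\\' then escapeLoop rest (newLine ++ ['\\', '\\'])
    else escapeLoop rest (newLine ++ [c])

def escape_and_count (line : String) : Int × Int :=
  let oldLen : Int := (line.toList.length : Int)
  let newLine : List Char := escapeLoop line.toList ['"'] ++ ['"']
  (oldLen, (newLine.length : Int))

def count_new_len (input : String) : Int :=
  let p : Int × Int := (PySem.Str.splitlines input).foldl
    (fun (acc : Int × Int) line =>
      let buffor := escape_and_count line
      (acc.1 + buffor.1, acc.2 + buffor.2)) (0, 0)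
  p.2 - p.1

-- ===== PORT B =====
def count_new_len_alt (input : String) : Int :=
  (PySem.Str.count input "\"" : Int) + (PySem.Str.count input "\\" : Int)
    + 2 * ((PySem.Str.splitlines input).length : Int)

-- ===== PRECONDITION & SPEC =====
def Spec_count_new_len (input : String) (out : Int) : Prop := out = count_new_len_alt input
instance (input : String) (out : Int) : Decidable (Spec_count_new_len input out) := by unfold Spec_count_new_len; infer_instance

-- ===== CLAIM =====
def Claim_equal_count_new_len : Prop := ∀ (input : String), Dom_count_new_len input → Spec_count_new_len input (count_new_len input)

-- ===== LEMMAS AND PROOFS =====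

theorem escapeLoop_length (line acc : List Char) :
    (escapeLoop line acc).length = acc.length + line.length + line.count '"' + line.count '\\' := by
  induction line generalizing acc with
  | nil => simp [escapeLoop]
  | cons c rest ih =>
    by_cases h1 : c = '"'
    · simp [escapeLoop, h1, ih]; omega
    · by_cases h2 : c = '\\'
      · simp [escapeLoop, h2, ih]; omega
      · simp [escapeLoop, h1, h2, ih]; omega

theorem countGo_single (c : Char) (fuel : Nat) (l : List Char) (acc : Nat)
    (h : l.length ≤ fuel) :
    PySem.Chars.count.go [c] fuel l acc = acc + l.count c := by
  induction fuel generalizing l acc with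
  | zero =>
    have : l = [] := List.eq_nil_of_length_eq_zero (Nat.le_zero.mp h)
    subst this; simp [PySem.Chars.count.go]
  | succ n ih =>
    cases l with
    | nil => simp [PySem.Chars.count.go]
    | cons hd tl =>
      by_cases hc : hd = c
      · have hp : List.isPrefixOf [c] (hd :: tl) = true := by
          simp [List.isPrefixOf, hc]
        simp only [PySem.Chars.count.go, hp, if_true, List.length_singleton,
          List.drop_succ_cons, List.drop_zero]
        rw [ih tl (acc + 1) (by simpa using h)]
        simp [hc]; omega
      · have hc' : ¬ c = hd := fun h => hc h.symm
        have hp : List.isPrefixOf [c] (hd :: tl) = false := by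
          simp [List.isPrefixOf, hc']
        simp only [PySem.Chars.count.go, hp, if_false, Bool.false_eq_true]
        rw [ih tl acc (by simpa using h)]
        have hb : (hd == c) = false := by simp [hc]
        simp [List.count_cons, hb]

theorem count_single (c : Char) (s : List Char) :
    PySem.Chars.count s [c] = s.count c := by
  simp [PySem.Chars.count, countGo_single c s.length s 0 le_rfl]

theorem splitlinesGo_nil (isB : Char → Bool) (cur : List Char) (acc : List (List Char)) :
    PySem.Chars.splitlines.go isB [] cur acc
      = if cur.isEmpty then acc.reverse else (cur.reverse :: acc).reverse := rfl

theorem splitlinesGo_rn (isB : Char → Bool) (rest cur : List Char) (acc : List (List Char)) :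
    PySem.Chars.splitlines.go isB ('\x0d' :: '\n' :: rest) cur acc
      = PySem.Chars.splitlines.go isB rest [] (cur.reverse :: acc) := rfl

theorem splitlinesGo_cons (isB : Char → Bool) (c : Char) (rest cur : List Char)
    (acc : List (List Char))
    (h : ∀ r, c = '\x0d' → rest = '\n' :: r → False) :
    PySem.Chars.splitlines.go isB (c :: rest) cur acc
      = if isB c then PySem.Chars.splitlines.go isB rest [] (cur.reverse :: acc)
        else PySem.Chars.splitlines.go isB rest (c :: cur) acc := by
  rw [PySem.Chars.splitlines.go.eq_def]
  split
  next heq => simp at heq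
  next r heq =>
    injection heq with h1 h2
    exact (h r h1 h2).elim
  next c2 r2 hne heq =>
    injection heq with h1 h2
    subst h1; subst h2; rfl

theorem splitlinesGo_count_sum (isB : Char → Bool) (c : Char)
    (hc : isB c = false) (hr : c ≠ '\x0d') (hn : c ≠ '\n') :
    ∀ (s cur : List Char) (acc : List (List Char)),
      ((PySem.Chars.splitlines.go isB s cur acc).map (fun l => l.count c)).sum
        = ((acc.map (fun l => l.count c)).sum + cur.count c) + s.count c := by
  intro s cur acc
  induction s, cur, acc using PySem.Chars.splitlines.go.induct isB with
  | case1 cur acc hemp =>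
    have hc0 : cur = [] := by simpa using hemp
    subst hc0
    simp [splitlinesGo_nil]
  | case2 cur acc hemp =>
    rw [splitlinesGo_nil]
    simp [hemp]
    try omega
  | case3 rest cur acc ih =>
    rw [splitlinesGo_rn, ih]
    simp [Ne.symm hr, Ne.symm hn]
    omega
  | case4 ch rest cur acc hne hB ih =>
    rw [splitlinesGo_cons isB ch rest cur acc hne, if_pos hB, ih]
    have hcc : ¬ (ch = c) := fun h => by subst h; rw [hB] at hc; exact absurd hc (by simp)
    simp [hcc]
    omega
  | case5 ch rest cur acc hne hB ih =>
    rw [splitlinesGo_cons isB ch rest cur acc hne, if_neg hB, ih]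
    by_cases hch : ch = c
    · subst hch; simp; omega
    · have hb2 : (ch == c) = false := by simp [hch]
      simp [List.count_cons, hb2]

theorem splitlines_count_sum (c : Char) (hr : c ≠ '\x0d') (hn : c ≠ '\n')
    (hB : (c.toNat = 10 ∨ c.toNat = 13 ∨ c.toNat = 11 ∨ c.toNat = 12 ∨ c.toNat = 28 ∨
      c.toNat = 29 ∨ c.toNat = 30 ∨ c.toNat = 133 ∨ c.toNat = 8232 ∨ c.toNat = 8233) → False)
    (s : List Char) :
    ((PySem.Chars.splitlines s).map (fun l => l.count c)).sum = s.count c := by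
  rw [PySem.Chars.splitlines]
  rw [splitlinesGo_count_sum _ c (by
    revert hB
    simp only [Bool.or_eq_false_iff, decide_eq_false_iff_not]
    tauto) hr hn]
  simp

-- the A-side fold, reduced to a per-line sum
theorem foldl_escape (lines : List String) (a b : Int) :
    ((lines.foldl (fun (acc : Int × Int) line =>
        let buffor := escape_and_count line
        (acc.1 + buffor.1, acc.2 + buffor.2)) (a, b)).2
      - (lines.foldl (fun (acc : Int × Int) line =>
        let buffor := escape_and_count line
        (acc.1 + buffor.1, acc.2 + buffor.2)) (a, b)).1)
    = (b - a) + ((lines.map (fun line =>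
        ((line.toList.count '"' : Int) + (line.toList.count '\\' : Int) + 2))).sum) := by
  induction lines generalizing a b with
  | nil => simp
  | cons l rest ih =>
    simp only [List.foldl_cons, List.map_cons, List.sum_cons]
    rw [ih]
    simp [escape_and_count, escapeLoop_length]
    ring

-- per-line sum split into the three whole aggregates
theorem sum_split (lines : List String) :
    (lines.map (fun line =>
        ((line.toList.count '"' : Int) + (line.toList.count '\\' : Int) + 2))).sum
      = (((lines.map (fun line => line.toList.count '"')).sum : Nat) : Int)
        + (((lines.map (fun line => line.toList.count '\\')).sum : Nat) : Int)
        + 2 * (lines.length : Int) := by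
  induction lines with
  | nil => simp
  | cons x xs ih =>
    simp only [List.map_cons, List.sum_cons, List.length_cons, ih]
    push_cast [Nat.cast_add]
    ring

-- ===== VERDICT (by name: the statement is the Claim_ definition above) =====
theorem count_new_len_spec : Claim_equal_count_new_len := by
  intro input _
  unfold Spec_count_new_len count_new_len count_new_len_alt
  rw [foldl_escape]
  have hq := splitlines_count_sum '"' (by decide) (by decide) (by decide) input.toList
  have hb := splitlines_count_sum '\\' (by decide) (by decide) (by decide) input.toList
  rw [← PySem.Str.splitlines_map_toList] at hq hb
  simp only [List.map_map, Function.comp_def] at hq hb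
  have hs : ("\"" : String).toList = ['"'] := by decide
  have hs2 : ("\\" : String).toList = ['\\'] := by decide
  rw [PySem.Str.count_eq, PySem.Str.count_eq, hs, hs2, count_single, count_single]
  rw [sum_split, hq, hb]
  ring
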